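-- pv_equiv track=rewrite | github.com/wade-code/python-misc | sar.py | sar64
-- ===== SOURCE A (Python) =====
-- def sar64(x, m):
--   if x & 0x8000000000000000 != 0:
--     filler = 0
--     for i in range(m):
--       filler |= 1 << 63-i
--     x = (x >> m) | filler
--     return x
--   else:
--     return x >> m
-- ===== SOURCE B (Python) =====
-- def sar64(x, m):
--   if x & 0x8000000000000000 != 0:
--     return (x >> m) | (((1 << m) - 1) << (64 - m))
--   else:
--     return x >> m
-- ===== Notes on version B (the rewrite author's own statement) =====
-- stated objective: simpler
-- what changed: Replaces A's O(m) loop that ORs the top bits one at a time with the single closed-form mask ((1 << m) - 1) << (64 - m), so the sign-set branch becomes one arithmetic expression.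
import Mathlib
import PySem

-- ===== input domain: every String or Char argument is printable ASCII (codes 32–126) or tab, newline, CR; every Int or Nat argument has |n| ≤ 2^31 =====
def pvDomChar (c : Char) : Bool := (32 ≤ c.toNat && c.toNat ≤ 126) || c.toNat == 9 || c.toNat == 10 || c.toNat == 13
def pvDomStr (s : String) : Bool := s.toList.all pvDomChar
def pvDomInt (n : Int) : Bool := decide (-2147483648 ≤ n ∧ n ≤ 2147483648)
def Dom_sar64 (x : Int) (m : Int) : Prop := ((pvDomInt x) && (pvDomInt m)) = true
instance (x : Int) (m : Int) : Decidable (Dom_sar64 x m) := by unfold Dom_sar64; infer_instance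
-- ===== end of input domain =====

-- B replaces A's O(m) bit-setting loop by one closed-form mask expression (objective: simpler).

-- ===== PORT A =====
def sar64 (x : Int) (m : Int) : Int :=
  if PySem.Int.band x 0x8000000000000000 ≠ 0 then
    let filler := (PySem.List.pyRange 0 m 1).foldl
      (fun f i => PySem.Int.bor f ((1 : Int) <<< (63 - i).toNat)) 0
    PySem.Int.bor (x >>> m.toNat) filler
  else
    x >>> m.toNat

-- ===== PORT B =====
def sar64_alt (x : Int) (m : Int) : Int :=
  if PySem.Int.band x 0x8000000000000000 ≠ 0 then
    PySem.Int.bor (x >>> m.toNat) ((((1 : Int) <<< m.toNat) - 1) <<< (64 - m).toNat)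
  else
    x >>> m.toNat

-- ===== PRECONDITION & SPEC =====
-- Pre_ excludes exactly the inputs where the Python A raises ValueError: negative shift
-- counts, and m > 64 with the sign bit set (A's loop reaches 1 << negative); B raises there too.
def Pre_sar64 (x : Int) (m : Int) : Prop :=
  0 ≤ m ∧ (PySem.Int.band x 0x8000000000000000 ≠ 0 → m ≤ 64)
instance (x : Int) (m : Int) : Decidable (Pre_sar64 x m) := by unfold Pre_sar64; infer_instance
def pvWitness_sar64 : Int × Int := (-5, 3)

def Spec_sar64 (x : Int) (m : Int) (out : Int) : Prop := out = sar64_alt x m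
instance (x : Int) (m : Int) (out : Int) : Decidable (Spec_sar64 x m out) := by unfold Spec_sar64; infer_instance

-- ===== CLAIM (what is proved, stated in full; the proofs are below) =====
def Claim_equal_sar64 : Prop := ∀ (x : Int) (m : Int), Dom_sar64 x m → Pre_sar64 x m → Spec_sar64 x m (sar64 x m)

-- ===== LEMMAS AND PROOFS =====
-- A's loop-built fill mask equals B's closed-form mask, for every legal shift count.
theorem filler_closed_form (m : Int) (h0 : 0 ≤ m) (h64 : m ≤ 64) :
    (PySem.List.pyRange 0 m 1).foldl
      (fun f i => PySem.Int.bor f ((1 : Int) <<< (63 - i).toNat)) 0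
    = (((1 : Int) <<< m.toNat) - 1) <<< (64 - m).toNat := by
  interval_cases m <;> decide

-- ===== VERDICT (by name: the statement is the Claim_ definition above) =====
theorem sar64_spec : Claim_equal_sar64 := by
  intro x m _ hpre
  unfold Spec_sar64 sar64 sar64_alt
  by_cases hbit : PySem.Int.band x 0x8000000000000000 ≠ 0
  · rw [if_pos hbit, if_pos hbit, filler_closed_form m hpre.1 (hpre.2 hbit)]
  · rw [if_neg hbit, if_neg hbit]
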